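-- pv_equiv track=rewrite | github.com/code-enig/Python | 15th/n^2배열자르기.py | solution
-- ===== SOURCE A (Python) =====
-- def solution(n, left, right):
--     answer = []
--     row = left // n # 몇번째 행
--     column = left % n # 나누어 떨어지면 마지막
--     length = right - left + 1
--     if length <= n - column: # 시작 행보다 짧거나 같을 때
--         answer = [row+1 if i <= row else i+1 for i in range(column,column+length)]
--     elif  length <= 2*n - column: #다음 행에서 끝날 때
--         answer = [row+1 if i <= row else i+1 for i in range(column,n)]
--         answer.extend([row+2 if i <= row+1 else i+1 for i in range(0,length-(n-column))])
--     else: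
--         answer = [row+1 if i <= row else i+1 for i in range(column,n)]
--         num_rows = 0
--         for row in range(row+1, row+1+(length-(n-column))//n):
--             num_rows += 1
--             answer.extend([row+1 if i <= row else i+1 for i in range(0,n)])
--         row+=1
--         answer.extend([row+1 if i <= row else i+1 for i in range(0,length-(n-column)-n*num_rows)])
--
--     return answer
-- ===== SOURCE B (Python) =====
-- def solution(n, left, right):
--     # each linear index i of the virtual n x n grid holds max(row, col) + 1
--     return [max(i // n, i % n) + 1 for i in range(left, right + 1)]
-- ===== Notes on version B (the rewrite author's own statement) =====
-- stated objective: simpler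
-- what changed: Replaces A's three-way case analysis with row-chunked list building by a single comprehension computing max(i//n, i%n)+1 directly from each linear index.
-- outside the precondition, e.g. on solution(-5, -8, -8): A returns [3, 3, 3], B returns [2]; on solution(0, 0, 1): A raises ZeroDivisionError, B raises ZeroDivisionError
import Mathlib
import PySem

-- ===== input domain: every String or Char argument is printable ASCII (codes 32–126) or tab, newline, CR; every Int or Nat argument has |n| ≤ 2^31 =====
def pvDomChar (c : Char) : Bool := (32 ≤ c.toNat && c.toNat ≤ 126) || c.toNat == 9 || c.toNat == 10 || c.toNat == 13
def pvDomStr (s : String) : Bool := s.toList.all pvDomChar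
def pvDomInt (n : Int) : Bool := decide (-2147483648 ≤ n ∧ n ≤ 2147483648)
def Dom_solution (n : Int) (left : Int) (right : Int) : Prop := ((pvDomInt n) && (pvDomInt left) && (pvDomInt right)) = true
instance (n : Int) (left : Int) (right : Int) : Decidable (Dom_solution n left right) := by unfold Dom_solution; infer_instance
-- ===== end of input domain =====

-- B replaces A's three-way case analysis and row-chunked extends by one uniform
-- comprehension computing max(i//n, i%n)+1 from each linear index (simpler).


-- ===== PORT A =====
-- the 'for row in range(...)' loop of A's else-branch: state = (answer, num_rows, row)
def solLoop (n : Int) : List Int → List Int × Int × Int → List Int × Int × Int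
  | [], st => st
  | r :: rs, (ans, num, _) =>
      solLoop n rs
        (ans ++ (PySem.List.pyRange 0 n 1).map (fun i => if i ≤ r then r + 1 else i + 1),
         num + 1, r)

def solution (n : Int) (left : Int) (right : Int) : List Int :=
  let row := PySem.Int.floordiv left n
  let column := PySem.Int.mod left n
  let length := right - left + 1
  if length ≤ n - column then
    (PySem.List.pyRange column (column + length) 1).map
      (fun i => if i ≤ row then row + 1 else i + 1)
  else if length ≤ 2 * n - column then
    ((PySem.List.pyRange column n 1).map (fun i => if i ≤ row then row + 1 else i + 1))
      ++ (PySem.List.pyRange 0 (length - (n - column)) 1).map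
           (fun i => if i ≤ row + 1 then row + 2 else i + 1)
  else
    let ans0 := (PySem.List.pyRange column n 1).map (fun i => if i ≤ row then row + 1 else i + 1)
    let st := solLoop n
      (PySem.List.pyRange (row + 1) (row + 1 + PySem.Int.floordiv (length - (n - column)) n) 1)
      (ans0, 0, row)
    let row2 := st.2.2 + 1
    st.1 ++ (PySem.List.pyRange 0 (length - (n - column) - n * st.2.1) 1).map
              (fun i => if i ≤ row2 then row2 + 1 else i + 1)

-- ===== PORT B =====
def solution_alt (n : Int) (left : Int) (right : Int) : List Int :=
  (PySem.List.pyRange left (right + 1) 1).map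
    (fun i => max (PySem.Int.floordiv i n) (PySem.Int.mod i n) + 1)

-- ===== PRECONDITION & SPEC =====
-- Pre_ restricts to the task's natural domain: a positive grid size n ≥ 1. A raises
-- ZeroDivisionError at n = 0, and for n < 0 A's floor-division values have no n×n-grid
-- meaning and B does not reproduce them.
def Pre_solution (n : Int) (left : Int) (right : Int) : Prop := 1 ≤ n
instance (n : Int) (left : Int) (right : Int) : Decidable (Pre_solution n left right) := by unfold Pre_solution; infer_instance
def pvWitness_solution : Int × Int × Int := (3, 2, 8)

def Spec_solution (n : Int) (left : Int) (right : Int) (out : List Int) : Prop := out = solution_alt n left right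
instance (n : Int) (left : Int) (right : Int) (out : List Int) : Decidable (Spec_solution n left right out) := by unfold Spec_solution; infer_instance

-- ===== CLAIM (what is proved, stated in full; the proofs are below) =====
def Claim_equal_solution : Prop := ∀ (n : Int) (left : Int) (right : Int), Dom_solution n left right → Pre_solution n left right → Spec_solution n left right (solution n left right)

-- ===== LEMMAS AND PROOFS =====

-- One chunk of A's row-wise output [if i ≤ q then q+1 else i+1 for i in range(a,b)], with
-- 0 ≤ a and b ≤ n, equals B's formula mapped over the linear indices n*q+a .. n*q+b-1.
theorem seg_eq (n q a b : Int) (hn : 1 ≤ n) (h0 : 0 ≤ a) (hb : b ≤ n) :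
    (PySem.List.pyRange a b 1).map (fun i => if i ≤ q then q + 1 else i + 1)
    = (PySem.List.pyRange (n * q + a) (n * q + b) 1).map
        (fun j => max (PySem.Int.floordiv j n) (PySem.Int.mod j n) + 1) := by
  rw [PySem.List.pyRange_one, PySem.List.pyRange_one, List.map_map, List.map_map]
  have hlen : (n * q + b - (n * q + a)).toNat = (b - a).toNat := by
    congr 1; ring
  rw [hlen]
  apply List.map_congr_left
  intro k hk
  have hk' : (k : Int) < b - a := by
    have := List.mem_range.mp hk
    omega
  simp only [Function.comp]
  set i : Int := a + (k : Int) with hi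
  have hi0 : 0 ≤ i := by omega
  have hin : i < n := by omega
  have hfd : PySem.Int.floordiv (n * q + i) n = q := by
    rw [PySem.Int.floordiv_eq_iff_of_pos (by omega)]
    constructor <;> nlinarith
  have hmd : PySem.Int.mod (n * q + i) n = i := by
    have h := PySem.Int.floordiv_mul_add_mod (n * q + i) n
    rw [hfd] at h; nlinarith [h]
  have harg : n * q + a + (k : Int) = n * q + i := by omega
  rw [harg, hfd, hmd]
  split_ifs with h <;> omega

-- gluing two adjacent mapped ranges
theorem map_range_glue {α : Type} (f : Int → α) (a b c : Int) (h1 : a ≤ b) (h2 : b ≤ c) :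
    (PySem.List.pyRange a b 1).map f ++ (PySem.List.pyRange b c 1).map f
    = (PySem.List.pyRange a c 1).map f := by
  rw [← List.map_append, ← PySem.List.pyRange_one_append a b c h1 h2]

-- the loop of A's else-branch, characterised
theorem solLoop_eq (n : Int) (rows : List Int) :
    ∀ (ans : List Int) (num r0 : Int),
      solLoop n rows (ans, num, r0)
      = (ans ++ rows.flatMap (fun r => (PySem.List.pyRange 0 n 1).map
            (fun i => if i ≤ r then r + 1 else i + 1)),
         num + (rows.length : Int), rows.getLastD r0) := by
  induction rows with
  | nil => intro ans num r0; simp [solLoop]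
  | cons r rs ih =>
      intro ans num r0
      rw [solLoop, ih]
      refine Prod.ext ?_ (Prod.ext ?_ ?_)
      · simp [List.flatMap_cons, List.append_assoc]
      · simp; omega
      · rw [List.getLastD_cons]

-- the flatMap of full-row chunks over rows r0+1 .. r0+m equals B's formula over the
-- corresponding linear indices
theorem flat_eq (n r0 : Int) (hn : 1 ≤ n) : ∀ (m : Nat),
    (PySem.List.pyRange (r0 + 1) (r0 + 1 + (m : Int)) 1).flatMap
        (fun r => (PySem.List.pyRange 0 n 1).map (fun i => if i ≤ r then r + 1 else i + 1))
    = (PySem.List.pyRange (n * (r0 + 1)) (n * (r0 + 1) + n * (m : Int)) 1).map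
        (fun j => max (PySem.Int.floordiv j n) (PySem.Int.mod j n) + 1) := by
  intro m
  induction m with
  | zero => simp [PySem.List.pyRange_one_eq_nil]
  | succ m ih =>
      have hsplit : PySem.List.pyRange (r0 + 1) (r0 + 1 + ((m : Int) + 1)) 1
          = PySem.List.pyRange (r0 + 1) (r0 + 1 + (m : Int)) 1 ++ [r0 + 1 + (m : Int)] := by
        have h := PySem.List.pyRange_one_succ_right
          (show r0 + 1 ≤ r0 + 1 + (m : Int) by omega)
        rw [show r0 + 1 + ((m : Int) + 1) = r0 + 1 + (m : Int) + 1 by ring, h]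
      push_cast
      rw [hsplit, List.flatMap_append, ih]
      simp only [List.flatMap_cons, List.flatMap_nil, List.append_nil]
      rw [seg_eq n (r0 + 1 + (m : Int)) 0 n hn le_rfl le_rfl]
      rw [show n * (r0 + 1 + (m : Int)) + 0 = n * (r0 + 1) + n * (m : Int) by ring,
          show n * (r0 + 1 + (m : Int)) + n = n * (r0 + 1) + n * ((m : Int) + 1) by ring]
      apply map_range_glue
      · nlinarith
      · nlinarith

-- ===== VERDICT (by name: the statement is the Claim_ definition above) =====
theorem solution_spec : Claim_equal_solution := by
  intro n left right _ hpre
  have hn : 1 ≤ n := hpre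
  unfold Spec_solution solution solution_alt
  simp only []
  set row := PySem.Int.floordiv left n with hrow
  set col := PySem.Int.mod left n with hcol
  set len := right - left + 1 with hlen
  have hc0 : 0 ≤ col := by
    rw [hcol, PySem.Int.mod_eq_emod_of_pos (by omega)]
    exact Int.emod_nonneg left (by omega)
  have hcn : col < n := by
    rw [hcol, PySem.Int.mod_eq_emod_of_pos (by omega)]
    exact Int.emod_lt_of_pos left (by omega)
  have hl : left = n * row + col := by
    have h := PySem.Int.floordiv_mul_add_mod left n
    rw [← hrow, ← hcol] at h; nlinarith [h]
  by_cases h1 : len ≤ n - col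
  · rw [if_pos h1, seg_eq n row col (col + len) hn hc0 (by omega)]
    rw [show left = n * row + col from hl,
        show right + 1 = n * row + (col + len) by rw [hlen]; linarith]
  · rw [if_neg h1]
    by_cases h2 : len ≤ 2 * n - col
    · have e2 := seg_eq n (row + 1) 0 (len - (n - col)) hn le_rfl (by omega)
      simp only [show row + 1 + 1 = row + 2 from by ring] at e2
      rw [if_pos h2, seg_eq n row col n hn hc0 le_rfl, e2]
      rw [show n * (row + 1) + 0 = n * row + n by ring,
          show n * (row + 1) + (len - (n - col)) = n * row + col + len by ring]
      rw [map_range_glue _ (n * row + col) (n * row + n) (n * row + col + len)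
            (by omega) (by omega)]
      rw [show left = n * row + col from hl,
          show right + 1 = n * row + col + len by rw [hlen]; linarith]
    · rw [if_neg h2]
      set x := len - (n - col) with hx
      set q := PySem.Int.floordiv x n with hq
      have hq1 : 1 ≤ q := by
        rw [hq, PySem.Int.floordiv_eq_ediv_of_pos (by omega)]
        apply Int.le_ediv_iff_mul_le (by omega) |>.mpr
        omega
      have hrem0 : 0 ≤ x - n * q ∧ x - n * q < n := by
        have h := PySem.Int.floordiv_mul_add_mod x n
        rw [← hq] at h
        have hm0 : 0 ≤ PySem.Int.mod x n := by
          rw [PySem.Int.mod_eq_emod_of_pos (by omega)]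
          exact Int.emod_nonneg x (by omega)
        have hmn : PySem.Int.mod x n < n := by
          rw [PySem.Int.mod_eq_emod_of_pos (by omega)]
          exact Int.emod_lt_of_pos x (by omega)
        constructor <;> nlinarith
      rw [solLoop_eq]
      have hqnat : ((q.toNat : Nat) : Int) = q := by omega
      have hrows : PySem.List.pyRange (row + 1) (row + 1 + q) 1
          = PySem.List.pyRange (row + 1) (row + 1 + ((q.toNat : Nat) : Int)) 1 := by
        rw [hqnat]
      have hflat := flat_eq n row hn q.toNat
      rw [hqnat] at hflat
      have hlenrows : ((PySem.List.pyRange (row + 1) (row + 1 + q) 1).length : Int) = q := by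
        rw [PySem.List.length_pyRange_one]; omega
      have hlast : (PySem.List.pyRange (row + 1) (row + 1 + q) 1).getLastD row = row + q := by
        rw [show row + 1 + q = row + q + 1 by ring]
        rw [PySem.List.pyRange_one_succ_right (show row + 1 ≤ row + q by omega)]
        simp
      simp only [hflat, hlenrows, hlast, zero_add]
      rw [seg_eq n (row + q + 1) 0 (x - n * q) hn le_rfl (by omega)]
      rw [seg_eq n row col n hn hc0 le_rfl]
      rw [List.append_assoc,
          show n * (row + q + 1) + 0 = n * (row + 1) + n * q by ring,
          map_range_glue _ (n * (row + 1)) (n * (row + 1) + n * q)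
            (n * (row + q + 1) + (x - n * q))
            (by nlinarith)
            (by have e : n * (row + q + 1) = n * (row + 1) + n * q := by ring
                linarith [hrem0.1, e]),
          show n * (row + 1) = n * row + n by ring,
          map_range_glue _ (n * row + col) (n * row + n)
            (n * (row + q + 1) + (x - n * q))
            (by linarith)
            (by have e : n * (row + q + 1) = n * row + n + n * q := by ring
                nlinarith [hrem0.1, e]),
          show left = n * row + col from hl,
          show right + 1 = n * (row + q + 1) + (x - n * q) by
            have e : n * (row + q + 1) = n * row + n + n * q := by ring
            rw [hx, hlen]
            linarith [e, hl]]
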